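-- pv_equiv track=rewrite | github.com/etherealwei/LC | leetcode_1.py | maximumMatchingIndices
-- ===== SOURCE A (Python) =====
-- from typing import List
--
-- def maximumMatchingIndices(nums1: List[int], nums2: List[int]) -> int:
--     new_nums1 = nums1 + nums1 + nums1
--     max_matching = 0
--     for i in range(2 * len(nums1)):
--         current = 0
--         for j in range(len(nums2)):
--             if new_nums1[i + j] == nums2[j]:
--                 current += 1
--         max_matching = max(max_matching, current)
--     return max_matching
-- ===== SOURCE B (Python) =====
-- from typing import List
--
-- def maximumMatchingIndices(nums1: List[int], nums2: List[int]) -> int: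
--     # Histogram over shift residues: for each matching value pair (p in nums1, j in nums2),
--     # credit the cyclic shift (p - j) mod n; the answer is the largest bucket.
--     n = len(nums1)
--     if n == 0:
--         return 0
--     counts = [0] * n
--     for j, v in enumerate(nums2):
--         for p, w in enumerate(nums1):
--             if w == v:
--                 counts[(p - j) % n] += 1
--     return max(counts)
-- ===== Notes on version B (the rewrite author's own statement) =====
-- stated objective: alternative
-- what changed: Instead of testing every shift of a tripled copy of nums1 against nums2 (brute force over 2n shifts), B builds a histogram over shift residues in one pass over the value pairs -- each matching pair (p,j) credits bucket (p-j) mod n -- and returns the largest bucket.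
import Mathlib
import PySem

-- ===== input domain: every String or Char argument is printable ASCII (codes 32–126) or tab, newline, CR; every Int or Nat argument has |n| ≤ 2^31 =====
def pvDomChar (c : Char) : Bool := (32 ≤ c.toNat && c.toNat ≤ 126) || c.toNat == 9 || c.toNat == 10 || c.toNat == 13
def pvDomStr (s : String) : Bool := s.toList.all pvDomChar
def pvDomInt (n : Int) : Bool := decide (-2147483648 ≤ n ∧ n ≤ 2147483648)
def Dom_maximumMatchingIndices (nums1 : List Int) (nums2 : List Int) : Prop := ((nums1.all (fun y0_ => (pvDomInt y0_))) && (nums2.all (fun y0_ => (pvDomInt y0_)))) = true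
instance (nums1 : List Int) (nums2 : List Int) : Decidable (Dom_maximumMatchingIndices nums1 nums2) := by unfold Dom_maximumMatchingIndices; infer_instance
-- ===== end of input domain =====

-- B replaces A's scan over all 2n shifts of a tripled nums1 by a histogram over shift
-- residues (p - j) mod n, filled in one pass over the matching value pairs (alternative
-- decomposition, same asymptotic cost).

-- ===== PORT A =====
def maximumMatchingIndices (nums1 : List Int) (nums2 : List Int) : Int :=
  let new_nums1 := nums1 ++ nums1 ++ nums1
  (PySem.List.pyRange 0 (2 * (nums1.length : Int)) 1).foldl (fun max_matching i =>
    let current := (PySem.List.pyRange 0 (nums2.length : Int) 1).foldl (fun c j =>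
      if PySem.List.pyGetD new_nums1 (i + j) 0 == PySem.List.pyGetD nums2 j 0 then c + 1 else c) 0
    max max_matching current) 0

-- ===== PORT B =====
def maximumMatchingIndices_alt (nums1 : List Int) (nums2 : List Int) : Int :=
  let n : Int := nums1.length
  if n == 0 then 0
  else
    let counts := (PySem.List.enumerate nums2 0).foldl (fun cnts jv =>
      (PySem.List.enumerate nums1 0).foldl (fun cnts pw =>
        if pw.2 == jv.2 then
          let r := PySem.Int.mod (pw.1 - jv.1) n
          PySem.List.pySetD cnts r (PySem.List.pyGetD cnts r 0 + 1)
        else cnts) cnts) (List.replicate nums1.length (0 : Int))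
    match PySem.List.max? counts (fun x => x) with
    | some m => m
    | none => 0

-- ===== PRECONDITION & SPEC =====
-- Pre_ excludes exactly the inputs where A raises IndexError: nums1 nonempty and
-- len(nums2) > len(nums1)+1 (the index i+j then runs past the tripled list).
def Pre_maximumMatchingIndices (nums1 : List Int) (nums2 : List Int) : Prop :=
  nums1 = [] ∨ nums2.length ≤ nums1.length + 1
instance (nums1 : List Int) (nums2 : List Int) : Decidable (Pre_maximumMatchingIndices nums1 nums2) := by
  unfold Pre_maximumMatchingIndices; infer_instance
def pvWitness_maximumMatchingIndices : List Int × List Int := ([1, 2, 3], [2, 3, 1])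

def Spec_maximumMatchingIndices (nums1 : List Int) (nums2 : List Int) (out : Int) : Prop := out = maximumMatchingIndices_alt nums1 nums2
instance (nums1 : List Int) (nums2 : List Int) (out : Int) : Decidable (Spec_maximumMatchingIndices nums1 nums2 out) := by unfold Spec_maximumMatchingIndices; infer_instance

-- ===== CLAIM (what is proved, stated in full; the proofs are below) =====
def Claim_equal_maximumMatchingIndices : Prop := ∀ (nums1 : List Int) (nums2 : List Int), Dom_maximumMatchingIndices nums1 nums2 → Pre_maximumMatchingIndices nums1 nums2 → Spec_maximumMatchingIndices nums1 nums2 (maximumMatchingIndices nums1 nums2)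

-- ===== LEMMAS AND PROOFS =====

-- the number of index matches at cyclic shift i
def pvCnt (nums1 nums2 : List Int) (i : Nat) : Int :=
  ((List.range nums2.length).countP
    (fun j => nums1.getD ((i + j) % nums1.length) 0 == nums2.getD j 0) : Int)

lemma pvCnt_nonneg (nums1 nums2 : List Int) (i : Nat) : 0 ≤ pvCnt nums1 nums2 i :=
  Int.natCast_nonneg _

lemma pvCnt_period (nums1 nums2 : List Int) (i : Nat) :
    pvCnt nums1 nums2 (nums1.length + i) = pvCnt nums1 nums2 i := by
  unfold pvCnt
  congr 1
  apply List.countP_congr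
  intro j _
  have h : nums1.length + i + j = i + j + nums1.length := by omega
  rw [h, Nat.add_mod_right]

lemma tripleGet (l : List Int) (k : Nat) (hk : k < 3 * l.length) :
    (l ++ l ++ l).getD k 0 = l.getD (k % l.length) 0 := by
  have hn : 0 < l.length := by omega
  rw [List.getD_eq_getElem?_getD, List.getD_eq_getElem?_getD]
  rcases Nat.lt_or_ge k l.length with h | h
  · rw [Nat.mod_eq_of_lt h,
      List.getElem?_append_left (by simp; omega),
      List.getElem?_append_left (by simpa using h)]
  · rcases Nat.lt_or_ge k (2 * l.length) with h2 | h2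
    · have hm : k % l.length = k - l.length := by
        rw [Nat.mod_eq_sub_mod h, Nat.mod_eq_of_lt (by omega)]
      rw [hm, List.getElem?_append_left (by simp; omega),
        List.getElem?_append_right (by simpa using h)]
    · have hm : k % l.length = k - 2 * l.length := by
        rw [Nat.mod_eq_sub_mod h, Nat.mod_eq_sub_mod (by omega),
          Nat.mod_eq_of_lt (by omega)]
        omega
      rw [hm, List.getElem?_append_right (by simp; omega)]
      simp only [List.length_append]
      have he : k - (l.length + l.length) = k - 2 * l.length := by omega
      rw [he]

lemma A_inner (nums1 nums2 : List Int) (h2 : nums2.length ≤ nums1.length + 1)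
    (i : Nat) (hi : i < 2 * nums1.length) :
    (PySem.List.pyRange 0 (nums2.length : Int) 1).foldl (fun c j =>
      if PySem.List.pyGetD (nums1 ++ nums1 ++ nums1) ((i : Int) + j) 0 ==
          PySem.List.pyGetD nums2 j 0 then c + 1 else c) 0
      = pvCnt nums1 nums2 i := by
  rw [PySem.List.pyRange_one]
  have hN : (((nums2.length : Int)) - 0).toNat = nums2.length := by omega
  rw [hN, List.foldl_map]
  rw [PySem.List.foldl_congr_mem
    (g := fun c (j : Nat) =>
      if nums1.getD ((i + j) % nums1.length) 0 == nums2.getD j 0 then c + 1 else c)]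
  · rw [PySem.List.foldl_if_add_one]
    unfold pvCnt
    ring
  · intro acc j hj
    rw [List.mem_range] at hj
    have hc1 : ((i : Int) + (0 + (j : Nat))) = ((i + j : Nat) : Int) := by push_cast; ring
    have hc2 : ((0 : Int) + (j : Nat)) = ((j : Nat) : Int) := by ring
    rw [hc1, hc2, PySem.List.pyGetD_natCast, PySem.List.pyGetD_natCast]
    rw [tripleGet nums1 (i + j) (by omega)]

lemma A_eval (nums1 nums2 : List Int) (h2 : nums2.length ≤ nums1.length + 1) :
    maximumMatchingIndices nums1 nums2 =
      (List.range (2 * nums1.length)).foldl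
        (fun mx i => max mx (pvCnt nums1 nums2 i)) 0 := by
  unfold maximumMatchingIndices
  rw [PySem.List.pyRange_one 0 (2 * (nums1.length : Int))]
  have hN : ((2 * (nums1.length : Int)) - 0).toNat = 2 * nums1.length := by omega
  rw [hN, List.foldl_map]
  apply PySem.List.foldl_congr_mem
  intro acc i hi
  rw [List.mem_range] at hi
  have hc : ((0 : Int) + (i : Nat)) = ((i : Nat) : Int) := by ring
  rw [hc, A_inner nums1 nums2 h2 i hi]

-- a fold of running max absorbs values already below the accumulator
lemma foldl_max_of_le (l : List Nat) (c : Nat → Int) (b : Int) (h : ∀ y ∈ l, c y ≤ b) :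
    l.foldl (fun mx i => max mx (c i)) b = b := by
  induction l generalizing b with
  | nil => rfl
  | cons x t ih =>
    have hx : c x ≤ b := h x (by simp)
    simp only [List.foldl_cons, max_eq_left hx]
    exact ih b (fun y hy => h y (by simp [hy]))

lemma A_half (nums1 nums2 : List Int) (h2 : nums2.length ≤ nums1.length + 1) :
    maximumMatchingIndices nums1 nums2 =
      (List.range nums1.length).foldl
        (fun mx i => max mx (pvCnt nums1 nums2 i)) 0 := by
  rw [A_eval nums1 nums2 h2]
  have h : 2 * nums1.length = nums1.length + nums1.length := by omega
  rw [h, List.range_add, List.foldl_append, List.foldl_map]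
  apply foldl_max_of_le (c := fun y => pvCnt nums1 nums2 (nums1.length + y))
  intro y hy
  rw [pvCnt_period]
  exact (PySem.List.le_foldl_max_int (List.range nums1.length)
    (fun i => pvCnt nums1 nums2 i) 0).2 y hy

-- countP of range against "p = p0 and q p" is the indicator of q p0
lemma countP_range_indicator (n p0 : Nat) (q : Nat → Bool) (h : p0 < n) :
    (List.range n).countP (fun p => decide (p = p0) && q p)
      = if q p0 then 1 else 0 := by
  induction n with
  | zero => omega
  | succ m ih =>
    rw [List.range_succ, List.countP_append]
    rcases Nat.lt_or_ge p0 m with hm | hm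
    · rw [ih hm]
      have hz : List.countP (fun p => decide (p = p0) && q p) [m] = 0 := by
        simp [List.countP_cons]
        omega
      rw [hz]
      omega
    · have hp : p0 = m := by omega
      subst hp
      have hz : (List.range p0).countP (fun p => decide (p = p0) && q p) = 0 := by
        apply List.countP_eq_zero.mpr
        intro p hp
        rw [List.mem_range] at hp
        simp
        omega
      rw [hz, List.countP_singleton]
      simp

lemma residue_iff (n p r j' : Nat) (hn : 0 < n) (hp : p < n) (hr : r < n) :
    ((p : Int) - (j' : Int)) % (n : Int) = (r : Int) ↔ p = (j' + r) % n := by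
  have hnZ : (0 : Int) < (n : Int) := by exact_mod_cast hn
  have hrZ : (r : Int) % n = r := Int.emod_eq_of_lt (by positivity) (by exact_mod_cast hr)
  have hpZ : (p : Int) % n = p := Int.emod_eq_of_lt (by positivity) (by exact_mod_cast hp)
  have hcast : (((j' + r) % n : Nat) : Int) = ((j' : Int) + r) % n := by push_cast; ring
  constructor
  · intro h
    have h1 : ((p : Int) - j') % n = (r : Int) % n := by rw [hrZ]; exact h
    rw [Int.emod_eq_emod_iff_emod_sub_eq_zero] at h1
    have h2 : (p : Int) % n = ((j' : Int) + r) % n := by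
      rw [Int.emod_eq_emod_iff_emod_sub_eq_zero]
      have he : (p : Int) - ((j' : Int) + r) = (p : Int) - j' - r := by ring
      rw [he]; exact h1
    rw [hpZ] at h2
    have h3 : (p : Int) = (((j' + r) % n : Nat) : Int) := by rw [hcast]; exact h2
    exact_mod_cast h3
  · intro h
    have hI : (p : Int) = ((j' : Int) + r) % n := by
      rw [← hcast]; exact_mod_cast congrArg (Nat.cast : Nat → Int) h
    rw [hI, Int.sub_emod, Int.emod_emod_of_dvd _ dvd_rfl, ← Int.sub_emod]
    have he : ((j' : Int) + r - j') = r := by ring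
    rw [he, hrZ]


lemma countP_shift (nums1 : List Int) (v : Int) (j' r : Nat)
    (hn : 0 < nums1.length) (hr : r < nums1.length) :
    (List.range nums1.length).countP
      (fun p => (nums1.getD p 0 == v) &&
        decide (((p : Int) - (j' : Int)) % (nums1.length : Int) = (r : Int)))
      = if nums1.getD ((j' + r) % nums1.length) 0 == v then 1 else 0 := by
  have hp0n : (j' + r) % nums1.length < nums1.length := Nat.mod_lt _ hn
  rw [← countP_range_indicator nums1.length ((j' + r) % nums1.length)
    (fun p => nums1.getD p 0 == v) hp0n]
  apply List.countP_congr
  intro p hp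
  rw [List.mem_range] at hp
  have hres : (((p : Int) - (j' : Int)) % (nums1.length : Int) = (r : Int))
      ↔ p = (j' + r) % nums1.length := residue_iff nums1.length p r j' hn hp hr
  have hd : (decide (((p : Int) - (j' : Int)) % (nums1.length : Int) = (r : Int)))
      = decide (p = (j' + r) % nums1.length) := decide_eq_decide.mpr hres
  rw [hd, Bool.and_comm]

lemma inner_aux (nums1 : List Int) (j' : Nat) (v : Int) (cnts : List Int)
    (hn : 0 < nums1.length) (hlen : cnts.length = nums1.length) (m : Nat) :
    (List.range m).foldl (fun cs (p : Nat) =>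
        if nums1.getD p 0 == v then
          PySem.List.pySetD cs (PySem.Int.mod ((p : Int) - (j' : Int)) (nums1.length : Int))
            (PySem.List.pyGetD cs (PySem.Int.mod ((p : Int) - (j' : Int)) (nums1.length : Int)) 0 + 1)
        else cs) cnts
    = (List.range nums1.length).map (fun r =>
        cnts.getD r 0 + (((List.range m).countP
          (fun p => (nums1.getD p 0 == v) &&
            decide (((p : Int) - (j' : Int)) % (nums1.length : Int) = (r : Int)))) : Int)) := by
  have hnZ : (0 : Int) < (nums1.length : Int) := by exact_mod_cast hn
  induction m with
  | zero =>
    simp only [List.range_zero, List.foldl_nil, List.countP_nil]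
    apply List.ext_getElem (by simp [hlen])
    intro i h1 h2
    simp only [List.getElem_map, List.getElem_range]
    rw [List.getD_eq_getElem?_getD, List.getElem?_eq_getElem (by omega), Option.getD_some]
    push_cast
    ring
  | succ m ih =>
    rw [List.range_succ, List.foldl_append, ih, List.foldl_cons, List.foldl_nil]
    set ρ : Int := PySem.Int.mod ((m : Int) - (j' : Int)) (nums1.length : Int) with hρ
    have hρ0 : 0 ≤ ρ := PySem.Int.mod_nonneg _ hnZ
    have hρn : ρ < (nums1.length : Int) := PySem.Int.mod_lt _ hnZ
    have hρe : ρ = ((m : Int) - (j' : Int)) % (nums1.length : Int) :=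
      PySem.Int.mod_eq_emod_of_pos hnZ
    have htn : ρ.toNat < nums1.length := by omega
    have htc : (ρ.toNat : Int) = ρ := Int.toNat_of_nonneg hρ0
    by_cases hv : (nums1.getD m 0 == v) = true
    · rw [if_pos hv]
      rw [PySem.List.pySetD_of_nonneg _ _ hρ0]
      rw [PySem.List.pyGetD_eq_getElem _ _ hρ0 (by simp; omega)]
      apply List.ext_getElem (by simp)
      intro i h1 h2
      rw [List.getElem_set]
      simp only [List.getElem_map, List.getElem_range] at h2 ⊢
      rw [List.countP_append, List.countP_singleton]
      by_cases hti : ρ.toNat = i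
      · subst hti
        have hdec : ((nums1.getD m 0 == v) &&
            decide (((m : Int) - (j' : Int)) % (nums1.length : Int) = ((ρ.toNat : Nat) : Int)))
            = true := by
          rw [hv]
          simp only [Bool.true_and, decide_eq_true_eq]
          rw [htc, hρe]
        rw [if_pos rfl, hdec]
        simp only [if_true]
        rw [Nat.cast_add, Nat.cast_one]
        ring
      · have hdec : ((nums1.getD m 0 == v) &&
            decide (((m : Int) - (j' : Int)) % (nums1.length : Int) = (i : Int)))
            = false := by
          rw [hv]
          simp only [Bool.true_and, decide_eq_false_iff_not]
          intro hcon
          apply hti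
          omega
        rw [if_neg hti, hdec]
        simp only [Bool.false_eq_true, if_false]
        rw [Nat.add_zero]
    · rw [if_neg hv]
      apply List.map_congr_left
      intro r hr
      rw [List.countP_append, List.countP_singleton]
      have hvf : (nums1.getD m 0 == v) = false := by simpa using hv
      simp only [hvf, Bool.false_and, Bool.false_eq_true, if_false]
      rw [Nat.add_zero]

lemma inner_step (nums1 : List Int) (j' : Nat) (v : Int) (cnts : List Int)
    (hn : 0 < nums1.length) (hlen : cnts.length = nums1.length) :
    (PySem.List.enumerate nums1 0).foldl (fun cs pw =>
      if pw.2 == v then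
        PySem.List.pySetD cs (PySem.Int.mod (pw.1 - (j' : Int)) (nums1.length : Int))
          (PySem.List.pyGetD cs (PySem.Int.mod (pw.1 - (j' : Int)) (nums1.length : Int)) 0 + 1)
      else cs) cnts
    = (List.range nums1.length).map (fun r =>
        cnts.getD r 0 +
          ((if nums1.getD ((j' + r) % nums1.length) 0 == v then 1 else 0) : Int)) := by
  rw [PySem.List.enumerate_eq_map_pyRange nums1 0]
  simp only [PySem.List.len_eq]
  rw [PySem.List.pyRange_one, List.map_map, List.foldl_map]
  have hN : (((nums1.length : Int)) - 0).toNat = nums1.length := by omega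
  rw [hN]
  rw [PySem.List.foldl_congr_mem
    (g := fun cs (p : Nat) =>
      if nums1.getD p 0 == v then
        PySem.List.pySetD cs (PySem.Int.mod ((p : Int) - (j' : Int)) (nums1.length : Int))
          (PySem.List.pyGetD cs (PySem.Int.mod ((p : Int) - (j' : Int)) (nums1.length : Int)) 0 + 1)
      else cs)]
  · rw [inner_aux nums1 j' v cnts hn hlen nums1.length]
    apply List.map_congr_left
    intro r hr
    rw [List.mem_range] at hr
    rw [countP_shift nums1 v j' r hn hr]
    by_cases hb : (nums1.getD ((j' + r) % nums1.length) 0 == v) = true <;>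
      simp only [hb, if_true, if_false, Bool.false_eq_true, Nat.cast_one, Nat.cast_zero]
  · intro acc p hp
    simp [Function.comp, zero_add, PySem.List.pyGetD_natCast]

lemma outer_aux (nums1 nums2 : List Int) (hn : 0 < nums1.length) (m : Nat) :
    (List.range m).foldl (fun cnts (j : Nat) =>
      (PySem.List.enumerate nums1 0).foldl (fun cs pw =>
        if pw.2 == nums2.getD j 0 then
          PySem.List.pySetD cs (PySem.Int.mod (pw.1 - (j : Int)) (nums1.length : Int))
            (PySem.List.pyGetD cs (PySem.Int.mod (pw.1 - (j : Int)) (nums1.length : Int)) 0 + 1)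
        else cs) cnts) (List.replicate nums1.length (0 : Int))
    = (List.range nums1.length).map (fun r =>
        (((List.range m).countP
          (fun j => nums1.getD ((j + r) % nums1.length) 0 == nums2.getD j 0)) : Int)) := by
  induction m with
  | zero =>
    simp only [List.range_zero, List.foldl_nil, List.countP_nil]
    apply List.ext_getElem (by simp)
    intro i h1 h2
    simp [List.getElem_replicate]
  | succ m ih =>
    rw [List.range_succ, List.foldl_append, ih, List.foldl_cons, List.foldl_nil]
    rw [inner_step nums1 m (nums2.getD m 0) _ hn (by simp)]
    apply List.map_congr_left
    intro r hr
    rw [List.mem_range] at hr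
    rw [List.getD_eq_getElem?_getD, List.getElem?_map,
      List.getElem?_range hr]
    simp only [Option.map_some, Option.getD_some]
    rw [List.countP_append, List.countP_singleton]
    by_cases hb : (nums1.getD ((m + r) % nums1.length) 0 == nums2.getD m 0) = true <;>
      simp only [hb, if_true, if_false, Bool.false_eq_true, Nat.cast_add, Nat.cast_one,
        add_zero]

lemma B_final (nums1 nums2 : List Int) (hn : nums1 ≠ []) :
    maximumMatchingIndices_alt nums1 nums2 =
      (List.range nums1.length).foldl
        (fun mx i => max mx (pvCnt nums1 nums2 i)) 0 := by
  obtain ⟨m', hm'⟩ : ∃ m', nums1.length = m' + 1 :=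
    ⟨nums1.length - 1, by cases nums1 <;> simp_all⟩
  have hn0 : 0 < nums1.length := by omega
  unfold maximumMatchingIndices_alt
  rw [if_neg (by simp; omega)]
  dsimp only
  rw [PySem.List.enumerate_eq_map_pyRange nums2 0]
  simp only [PySem.List.len_eq]
  rw [PySem.List.pyRange_one, List.map_map, List.foldl_map]
  have hN : (((nums2.length : Int)) - 0).toNat = nums2.length := by omega
  rw [hN]
  rw [PySem.List.foldl_congr_mem
    (g := fun cnts (j : Nat) =>
      (PySem.List.enumerate nums1 0).foldl (fun cs pw =>
        if pw.2 == nums2.getD j 0 then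
          PySem.List.pySetD cs (PySem.Int.mod (pw.1 - (j : Int)) (nums1.length : Int))
            (PySem.List.pyGetD cs (PySem.Int.mod (pw.1 - (j : Int)) (nums1.length : Int)) 0 + 1)
        else cs) cnts)]
  · rw [outer_aux nums1 nums2 hn0 nums2.length]
    have hcounts : (List.range nums1.length).map (fun r =>
        (((List.range nums2.length).countP
          (fun j => nums1.getD ((j + r) % nums1.length) 0 == nums2.getD j 0)) : Int))
        = (List.range nums1.length).map (fun r => pvCnt nums1 nums2 r) := by
      apply List.map_congr_left
      intro r _
      unfold pvCnt
      congr 1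
      apply List.countP_congr
      intro j _
      rw [Nat.add_comm j r]
    rw [hcounts, hm', List.range_succ_eq_map, List.map_cons, PySem.List.max?_id_cons,
      List.map_map, List.foldl_cons, List.foldl_map]
    simp only [max_eq_right (pvCnt_nonneg nums1 nums2 0)]
    rw [List.foldl_map]
    rfl
  · intro acc j hj
    apply PySem.List.foldl_congr_mem
    intro cs pw _
    simp [Function.comp, zero_add, PySem.List.pyGetD_natCast]

-- ===== VERDICT (by name: the statement is the Claim_ definition above) =====
theorem maximumMatchingIndices_spec : Claim_equal_maximumMatchingIndices := by
  intro nums1 nums2 _ hpre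
  unfold Spec_maximumMatchingIndices
  by_cases hnil : nums1 = []
  · subst hnil
    have hA : maximumMatchingIndices [] nums2 = 0 := by
      unfold maximumMatchingIndices
      rw [PySem.List.pyRange_one_eq_nil
        (a := 0) (b := 2 * ((List.length ([] : List Int)) : Int)) (by norm_num)]
      rfl
    have hB : maximumMatchingIndices_alt [] nums2 = 0 := by
      unfold maximumMatchingIndices_alt
      rw [if_pos (by decide)]
    rw [hA, hB]
  · have h2 : nums2.length ≤ nums1.length + 1 := by
      rcases hpre with h | h
      · exact absurd h hnil
      · exact h
    rw [A_half nums1 nums2 h2, B_final nums1 nums2 hnil]
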